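-- pv_equiv track=rewrite | github.com/catSirup/coding_test | Estsoft_CodingTest/test.py | solution
-- ===== SOURCE A (Python) =====
-- def solution(ranks):
--     answer = 0
--     sortedList = sorted(ranks)
--     flag = 0
--     for i in sortedList:
--         if i == sortedList[0]:
--             flag = i
--
--         elif i == (flag + 1):
--             answer += sortedList.count(flag)
--             flag = i
--
--         elif i != flag and i != flag + 1:
--             flag = i
--
--     return answer
-- ===== SOURCE B (Python) =====
-- def solution(ranks):
--     counts = {}
--     for r in ranks:
--         counts[r] = counts.get(r, 0) + 1
--     return sum(c for v, c in counts.items() if v + 1 in counts)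
-- ===== Notes on version B (the rewrite author's own statement) =====
-- stated objective: faster
-- what changed: replaced sort + per-transition list.count scans with a single-pass frequency dictionary and one sum over its items
import Mathlib
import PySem

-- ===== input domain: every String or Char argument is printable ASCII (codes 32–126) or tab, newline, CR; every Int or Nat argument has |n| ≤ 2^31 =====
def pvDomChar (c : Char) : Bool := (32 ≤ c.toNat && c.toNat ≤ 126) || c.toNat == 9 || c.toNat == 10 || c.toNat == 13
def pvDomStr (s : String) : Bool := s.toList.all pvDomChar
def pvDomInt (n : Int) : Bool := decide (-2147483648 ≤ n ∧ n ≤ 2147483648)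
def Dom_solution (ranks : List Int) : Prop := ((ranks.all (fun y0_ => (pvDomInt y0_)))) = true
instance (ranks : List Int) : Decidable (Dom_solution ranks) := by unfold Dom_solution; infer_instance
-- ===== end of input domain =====

-- B replaces A's sort + repeated list.count scans with a one-pass frequency dictionary summed once (objective: faster).


-- ===== PORT A =====
-- the body of A's for-loop, on the state (answer, flag); sortedList is nonempty whenever
-- the loop body runs, so `i == sortedList[0]` is `pyGet? sortedList 0 = some i` (exact)
def stepA (sortedList : List Int) (st : Int × Int) (i : Int) : Int × Int :=
  if PySem.List.pyGet? sortedList 0 = some i then        -- if i == sortedList[0]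
    (st.1, i)                                            --   flag = i
  else if i = st.2 + 1 then                              -- elif i == (flag + 1)
    (st.1 + (PySem.List.count sortedList st.2 : Int), i) --   answer += sortedList.count(flag); flag = i
  else if i ≠ st.2 ∧ i ≠ st.2 + 1 then                   -- elif i != flag and i != flag + 1
    (st.1, i)                                            --   flag = i
  else st

def solution (ranks : List Int) : Int :=
  let sortedList := PySem.List.sorted ranks (fun x => x) false
  (sortedList.foldl (stepA sortedList) ((0 : Int), (0 : Int))).1

-- ===== PORT B =====
def solution_alt (ranks : List Int) : Int :=
  let counts := ranks.foldl (fun d r => d.insert r (d.getD r 0 + 1)) (PySem.Dict.empty)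
  (((counts.items.filter (fun p => counts.contains (p.1 + 1))).map (fun p => p.2)).sum)

-- ===== PRECONDITION & SPEC =====
def Spec_solution (ranks : List Int) (out : Int) : Prop := out = solution_alt ranks
instance (ranks : List Int) (out : Int) : Decidable (Spec_solution ranks out) := by unfold Spec_solution; infer_instance

-- ===== CLAIM (what is proved, stated in full; the proofs are below) =====
def Claim_equal_solution : Prop := ∀ (ranks : List Int), Dom_solution ranks → Spec_solution ranks (solution ranks)

-- ===== LEMMAS AND PROOFS =====

-- the quantity both programs compute: for each distinct value v with v+1 present, the count of v
def midSum (c : List Int) (s : List Int) : Int :=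
  (s.toFinset).sum (fun v => if v + 1 ∈ s then (c.count v : Int) else 0)

-- what A's loop adds: flag always equals the previous element; the addition fires
-- iff the element is not the head value and equals previous+1
def loopSum (s : List Int) (f : Int) (l : List Int) : Int :=
  match l with
  | [] => 0
  | i :: t =>
      (if ¬ (PySem.List.pyGet? s 0 = some i) ∧ i = f + 1
       then (PySem.List.count s f : Int) else 0) + loopSum s i t

-- the same, with the head test dropped (valid once h ≤ flag)
def pairSumF (c : List Int) (f : Int) : List Int → Int
  | [] => 0
  | x :: t => (if x = f + 1 then (PySem.List.count c f : Int) else 0) + pairSumF c x t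

theorem fold_eq_loopSum (s : List Int) (l : List Int) (a f : Int) :
    (l.foldl (stepA s) (a, f)).1 = a + loopSum s f l := by
  induction l generalizing a f with
  | nil => simp [loopSum]
  | cons i t ih =>
      simp only [List.foldl_cons]
      by_cases h1 : PySem.List.pyGet? s 0 = some i
      · rw [show stepA s (a, f) i = (a, i) from by unfold stepA; rw [if_pos h1]]
        rw [ih]
        simp only [loopSum]
        rw [if_neg (fun hc => hc.1 h1)]
        ring
      · by_cases h2 : i = f + 1
        · rw [show stepA s (a, f) i = (a + (PySem.List.count s f : Int), i) from by
            unfold stepA; rw [if_neg h1, if_pos h2]]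
          rw [ih]
          simp only [loopSum]
          rw [if_pos ⟨h1, h2⟩]
          ring
        · by_cases h3 : i = f
          · rw [show stepA s (a, f) i = (a, f) from by
              unfold stepA; rw [if_neg h1, if_neg h2, if_neg (fun hc => hc.1 h3)]]
            rw [ih]
            simp only [loopSum]
            rw [if_neg (fun hc => h2 hc.2), h3]
            ring
          · rw [show stepA s (a, f) i = (a, i) from by
              unfold stepA; rw [if_neg h1, if_neg h2, if_pos ⟨h3, h2⟩]]
            rw [ih]
            simp only [loopSum]
            rw [if_neg (fun hc => h2 hc.2)]
            ring
theorem loopSum_eq_pairSumF (s : List Int) (h : Int)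
    (hh : PySem.List.pyGet? s 0 = some h) :
    ∀ (l : List Int) (f : Int), h ≤ f → (∀ z ∈ l, h ≤ z) →
      loopSum s f l = pairSumF s f l := by
  intro l
  induction l with
  | nil => intro f _ _; rfl
  | cons x t ih =>
      intro f hf hl
      simp only [loopSum, pairSumF]
      have hx : h ≤ x := hl x (by simp)
      have ht : loopSum s x t = pairSumF s x t :=
        ih x hx (fun z hz => hl z (by simp [hz]))
      rw [ht]
      congr 1
      by_cases hx1 : x = f + 1
      · have hne : ¬ (PySem.List.pyGet? s 0 = some x) := by
          intro he
          rw [hh] at he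
          injection he with h'
          omega
        rw [if_pos ⟨hne, hx1⟩, if_pos hx1]
      · rw [if_neg (fun hc => hx1 hc.2), if_neg hx1]
theorem pairSumF_eq_midSum (c : List Int) :
    ∀ (l : List Int) (x : Int), (x :: l).Pairwise (· ≤ ·) →
      pairSumF c x l = midSum c (x :: l) := by
  intro l
  induction l with
  | nil =>
      intro x _
      simp [pairSumF, midSum]
  | cons y l ih =>
      intro x hp
      have hxy : x ≤ y := (List.pairwise_cons.1 hp).1 y (by simp)
      have hyl : (y :: l).Pairwise (· ≤ ·) := (List.pairwise_cons.1 hp).2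
      have hymin : ∀ z ∈ y :: l, y ≤ z := by
        intro z hz
        rcases List.mem_cons.1 hz with h | h
        · omega
        · exact (List.pairwise_cons.1 hyl).1 z h
      simp only [pairSumF]
      rw [ih y hyl]
      by_cases hxe : x = y
      · subst hxe
        have h1 : midSum c (x :: x :: l) = midSum c (x :: l) := by
          unfold midSum
          rw [show (x :: x :: l).toFinset = (x :: l).toFinset from by simp]
          refine Finset.sum_congr rfl (fun v _ => ?_)
          have hm : (v + 1 ∈ x :: x :: l) ↔ (v + 1 ∈ x :: l) := by
            simp only [List.mem_cons]
            tauto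
          exact if_congr hm rfl rfl
        rw [h1, if_neg (by omega : ¬ (x = x + 1))]
        ring
      · have hlt : x < y := lt_of_le_of_ne hxy hxe
        have hnm : x ∉ (y :: l).toFinset := by
          intro hmem
          have := hymin x (List.mem_toFinset.1 hmem)
          omega
        have hhead : (x + 1 ∈ x :: y :: l) ↔ (y = x + 1) := by
          constructor
          · intro hm
            rcases List.mem_cons.1 hm with h | h
            · omega
            · have := hymin _ h
              omega
          · intro hy
            simp [List.mem_cons, hy]
        have hexp : midSum c (x :: y :: l) =
            (if y = x + 1 then (c.count x : Int) else 0) + midSum c (y :: l) := by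
          unfold midSum
          rw [show (x :: y :: l).toFinset = insert x ((y :: l).toFinset) from by simp]
          rw [Finset.sum_insert hnm]
          congr 1
          · exact if_congr hhead rfl rfl
          · refine Finset.sum_congr rfl (fun v hv => ?_)
            have hvy : y ≤ v := hymin v (List.mem_toFinset.1 hv)
            have hm : (v + 1 ∈ x :: y :: l) ↔ (v + 1 ∈ y :: l) := by
              simp only [List.mem_cons]
              constructor
              · rintro (h | h)
                · omega
                · tauto
              · tauto
            exact if_congr hm rfl rfl
        rw [hexp, PySem.List.count_eq]
theorem solution_eq_midSum (ranks : List Int) :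
    solution ranks =
      midSum (PySem.List.sorted ranks (fun x => x) false)
             (PySem.List.sorted ranks (fun x => x) false) := by
  simp only [solution]
  cases hs : PySem.List.sorted ranks (fun x => x) false with
  | nil => simp [midSum]
  | cons h t =>
      have hh : PySem.List.pyGet? (h :: t) 0 = some h := by
        simp [PySem.List.pyGet?, PySem.List.pyIdx?]
      have hpw : (h :: t).Pairwise (· ≤ ·) := by
        rw [← hs]
        exact PySem.List.sorted_pairwise ranks (fun x => x)
      rw [fold_eq_loopSum]
      simp only [loopSum]
      rw [if_neg (fun hc => hc.1 hh)]
      rw [loopSum_eq_pairSumF (h :: t) h hh t h le_rfl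
        (fun z hz => (List.pairwise_cons.1 hpw).1 z hz)]
      rw [pairSumF_eq_midSum (h :: t) t h hpw]
      ring

theorem sum_map_ite (g : Int → Int) (p : Int → Bool) (l : List Int) :
    (((l.filter p).map g).sum) = ((l.map (fun v => if p v then g v else 0)).sum) := by
  induction l with
  | nil => rfl
  | cons x t ih =>
      by_cases hx : p x = true
      · simp [hx, ih]
      · simp only [Bool.not_eq_true] at hx
        simp [hx, ih]

theorem solution_alt_eq_midSum (ranks : List Int) :
    solution_alt ranks = midSum ranks ranks := by
  simp only [solution_alt]
  rw [PySem.Dict.foldl_insert_getD_add_one_eq_counter]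
  rw [PySem.Dict.items_counter]
  rw [List.filter_map, List.map_map]
  rw [show ((fun (p : Int × Int) => (PySem.Dict.counter ranks).contains (p.1 + 1)) ∘
        (fun k => (k, (ranks.count k : Int)))) =
      (fun v => decide (v + 1 ∈ ranks)) from by
    funext v
    simp [PySem.Dict.contains_counter]]
  rw [show ((fun (p : Int × Int) => p.2) ∘ (fun k => (k, (ranks.count k : Int)))) =
      (fun v => (ranks.count v : Int)) from rfl]
  rw [sum_map_ite (fun v => (ranks.count v : Int)) (fun v => decide (v + 1 ∈ ranks))]
  rw [show (fun v => if (decide (v + 1 ∈ ranks)) = true then (ranks.count v : Int) else 0) =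
      (fun v => if v + 1 ∈ ranks then (ranks.count v : Int) else 0) from by
    funext v
    simp]
  have hnd : (PySem.Set.ofList ranks).Nodup := PySem.Set.nodup_ofList ranks
  have hsum := List.sum_toFinset
    (fun v => if v + 1 ∈ ranks then (ranks.count v : Int) else 0) hnd
  have hfs : (PySem.Set.ofList ranks).toFinset = ranks.toFinset := by
    apply Finset.ext
    intro v
    simp [List.mem_toFinset, PySem.Set.mem_ofList]
  rw [hfs] at hsum
  rw [← hsum]
  unfold midSum
  rfl
theorem solution_spec : Claim_equal_solution := by
  intro ranks _
  unfold Spec_solution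
  rw [solution_eq_midSum, solution_alt_eq_midSum]
  have hperm : (PySem.List.sorted ranks (fun x => x) false).Perm ranks :=
    PySem.List.sorted_perm ranks (fun x => x) false
  unfold midSum
  rw [List.toFinset_eq_of_perm _ _ hperm]
  refine Finset.sum_congr rfl (fun v _ => ?_)
  rw [hperm.count_eq]
  exact if_congr hperm.mem_iff rfl rfl
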